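-- pv_equiv track=rewrite | github.com/mortimerliu/LeetCode | algorithms/python/hard/2361.MinimumCostsUsingTheTrainLine.py | minimumCosts
-- ===== SOURCE A (Python) =====
-- from typing import List
--
-- def minimumCosts(
--     regular: List[int], express: List[int], expressCost: int
-- ) -> List[int]:
--     """
--     Solution 1: DP
--
--     dp[i]: min cost to reach i
--     dp_reg[i]: min cost to reach i with reg as last route
--     dp_exp[i]: min cost to reach i with exp as last route
--
--     dp_reg[i] = min(dp_reg[i-1], dp_exp[i-1]) + regular[i]
--     dp_exp[i] = min(dp_reg[i-1] + expressCost, dp_exp[i-1]) + express[i]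
--     dp[i] = min(dp_reg[i], dp_exp[i])
--
--     dp_reg[0] = 0, dp_exp[0] = expressCost
--
--     Space can be optimized to O(1) easily (doesn't count for the space for answer)
--
--     Time O(n)
--     """
--     n = len(regular)
--     dp_reg = [0] * (n + 1)
--     dp_exp = [expressCost] * (n + 1)
--     dp = [0] * n
--     for i in range(1, n + 1):
--         dp_reg[i] = min(dp_reg[i - 1], dp_exp[i - 1]) + regular[i - 1]
--         dp_exp[i] = min(dp_reg[i - 1] + expressCost, dp_exp[i - 1]) + express[i - 1]
--         dp[i - 1] = min(dp_reg[i], dp_exp[i])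
--     return dp
-- ===== SOURCE B (Python) =====
-- def minimumCosts(regular, express, expressCost):
--     # Tropical (min-plus) 2x2 matrix scan: stop i contributes the matrix
--     # M_i = [[x, x], [y + expressCost, y]] over the (min, +) semiring
--     # (None encodes +infinity).  Maintain the running left product P of the
--     # stop matrices and read off each answer by applying P to the start
--     # vector (0, expressCost).
--     def madd(a, b):  # semiring "+" = min, None = +infinity
--         if a is None:
--             return b
--         if b is None:
--             return a
--         return min(a, b)
--
--     def mmul(a, b):  # semiring "*" = +, None absorbing
--         return None if a is None or b is None else a + b
--
--     res = []
--     p00, p01, p10, p11 = 0, None, None, 0  # min-plus identity matrix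
--     for x, y in zip(regular, express):
--         # P := M_i * P
--         q00 = madd(mmul(x, p00), mmul(x, p10))
--         q01 = madd(mmul(x, p01), mmul(x, p11))
--         q10 = madd(mmul(y + expressCost, p00), mmul(y, p10))
--         q11 = madd(mmul(y + expressCost, p01), mmul(y, p11))
--         p00, p01, p10, p11 = q00, q01, q10, q11
--         r = madd(mmul(p00, 0), mmul(p01, expressCost))
--         e = madd(mmul(p10, 0), mmul(p11, expressCost))
--         res.append(madd(r, e))
--     return res
-- ===== Notes on version B (the rewrite author's own statement) =====
-- stated objective: alternative
-- what changed: Replaces the three-array DP fill with a tropical (min-plus) 2x2 matrix scan: each stop becomes a matrix over the (min,+) semiring, a running left product is maintained, and each answer is read off by applying the product to the start vector (0, expressCost).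
-- outside the precondition, e.g. on minimumCosts([1, 2], [3], 5): A raises IndexError, B returns [1]
import Mathlib
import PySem

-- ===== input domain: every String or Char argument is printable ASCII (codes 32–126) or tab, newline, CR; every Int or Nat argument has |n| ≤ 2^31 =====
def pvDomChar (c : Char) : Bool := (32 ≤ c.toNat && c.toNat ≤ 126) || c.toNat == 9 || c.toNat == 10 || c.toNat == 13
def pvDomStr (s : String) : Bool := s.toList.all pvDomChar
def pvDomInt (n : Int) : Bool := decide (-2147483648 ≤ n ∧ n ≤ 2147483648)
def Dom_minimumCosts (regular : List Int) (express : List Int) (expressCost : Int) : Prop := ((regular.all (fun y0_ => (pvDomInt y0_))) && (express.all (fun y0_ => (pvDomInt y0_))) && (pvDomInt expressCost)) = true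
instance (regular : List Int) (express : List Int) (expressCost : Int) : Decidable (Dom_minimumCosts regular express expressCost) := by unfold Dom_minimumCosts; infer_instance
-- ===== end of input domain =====

-- B replaces A's three-array DP fill with a tropical (min-plus) 2x2 matrix scan: each stop is a
-- matrix over the (min,+) semiring, a running left product is kept, and each answer is read off by
-- applying the product to the start vector (0, expressCost) (objective: alternative; equal on Pre_).

-- ===== PORT A =====
-- loop body of A's 'for i in range(1, n + 1)': state = (dp_reg, dp_exp, dp)
def stepA (regular : List Int) (express : List Int) (expressCost : Int)
    (st : List Int × List Int × List Int) (i : Int) : List Int × List Int × List Int :=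
  let dpReg' := PySem.List.pySetD st.1 i
      (min (PySem.List.pyGetD st.1 (i - 1) 0) (PySem.List.pyGetD st.2.1 (i - 1) 0)
        + PySem.List.pyGetD regular (i - 1) 0)
  let dpExp' := PySem.List.pySetD st.2.1 i
      (min (PySem.List.pyGetD dpReg' (i - 1) 0 + expressCost) (PySem.List.pyGetD st.2.1 (i - 1) 0)
        + PySem.List.pyGetD express (i - 1) 0)
  let dp' := PySem.List.pySetD st.2.2 (i - 1)
      (min (PySem.List.pyGetD dpReg' i 0) (PySem.List.pyGetD dpExp' i 0))
  (dpReg', dpExp', dp')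

def minimumCosts (regular : List Int) (express : List Int) (expressCost : Int) : List Int :=
  let n := regular.length
  let dpReg := List.replicate (n + 1) (0 : Int)
  let dpExp := List.replicate (n + 1) expressCost
  let dp := List.replicate n (0 : Int)
  ((PySem.List.pyRange 1 ((n : Int) + 1) 1).foldl (stepA regular express expressCost)
      (dpReg, dpExp, dp)).2.2

-- ===== PORT B =====
-- min-plus semiring helpers: none = +infinity
def madd : Option Int → Option Int → Option Int
  | none, b => b
  | some a, none => some a
  | some a, some b => some (min a b)

def mmul : Option Int → Option Int → Option Int
  | some a, some b => some (a + b)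
  | _, _ => none

-- a 2x2 min-plus matrix ((p00, p01), (p10, p11))
-- loop body of B's 'for x, y in zip(regular, express)': state = (res, P)
def stepB (expressCost : Int)
    (st : List Int × ((Option Int × Option Int) × (Option Int × Option Int)))
    (p : Int × Int) : List Int × ((Option Int × Option Int) × (Option Int × Option Int)) :=
  let P := st.2
  let q00 := madd (mmul (some p.1) P.1.1) (mmul (some p.1) P.2.1)
  let q01 := madd (mmul (some p.1) P.1.2) (mmul (some p.1) P.2.2)
  let q10 := madd (mmul (some (p.2 + expressCost)) P.1.1) (mmul (some p.2) P.2.1)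
  let q11 := madd (mmul (some (p.2 + expressCost)) P.1.2) (mmul (some p.2) P.2.2)
  let r := madd (mmul q00 (some 0)) (mmul q01 (some expressCost))
  let e := madd (mmul q10 (some 0)) (mmul q11 (some expressCost))
  -- Python's res.append(madd(r, e)) appends an int (the entry is always finite after the
  -- first multiplication); '.getD 0' extracts it and is exact on every reachable state.
  (st.1 ++ [(madd r e).getD 0], ((q00, q01), (q10, q11)))

def minimumCosts_alt (regular : List Int) (express : List Int) (expressCost : Int) : List Int :=
  ((regular.zip express).foldl (stepB expressCost)
      ([], ((some 0, none), (none, some 0)))).1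

-- ===== PRECONDITION & SPEC =====
-- Pre_ excludes exactly the inputs where A raises IndexError (express shorter than regular).
def Pre_minimumCosts (regular : List Int) (express : List Int) (expressCost : Int) : Prop :=
  regular.length ≤ express.length
instance (regular : List Int) (express : List Int) (expressCost : Int) : Decidable (Pre_minimumCosts regular express expressCost) := by unfold Pre_minimumCosts; infer_instance

def pvWitness_minimumCosts : List Int × List Int × Int := ([1, 7], [3, 2], 4)

def Spec_minimumCosts (regular : List Int) (express : List Int) (expressCost : Int) (out : List Int) : Prop := out = minimumCosts_alt regular express expressCost
instance (regular : List Int) (express : List Int) (expressCost : Int) (out : List Int) : Decidable (Spec_minimumCosts regular express expressCost out) := by unfold Spec_minimumCosts; infer_instance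

-- ===== CLAIM (what is proved, stated in full; the proofs are below) =====
def Claim_equal_minimumCosts : Prop := ∀ (regular : List Int) (express : List Int) (expressCost : Int), Dom_minimumCosts regular express expressCost → Pre_minimumCosts regular express expressCost → Spec_minimumCosts regular express expressCost (minimumCosts regular express expressCost)

-- ===== LEMMAS AND PROOFS =====

-- reference recurrence: (dp_reg value, dp_exp value) at stop k
def specRE (regular express : List Int) (c : Int) : Nat → Int × Int
  | 0 => (0, c)
  | k + 1 =>
    (min (specRE regular express c k).1 (specRE regular express c k).2
       + PySem.List.pyGetD regular (k : Int) 0,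
     min ((specRE regular express c k).1 + c) (specRE regular express c k).2
       + PySem.List.pyGetD express (k : Int) 0)

-- the first k answers
def ansList (regular express : List Int) (c : Int) (k : Nat) : List Int :=
  (List.range k).map (fun j =>
    min (specRE regular express c (j + 1)).1 (specRE regular express c (j + 1)).2)

-- one coordinate of min-plus associativity (M * P) * v = M * (P * v)
theorem row_assoc (a b p q r s v w : Option Int) :
    madd (mmul (madd (mmul a p) (mmul b r)) v) (mmul (madd (mmul a q) (mmul b s)) w)
    = madd (mmul a (madd (mmul p v) (mmul q w))) (mmul b (madd (mmul r v) (mmul s w))) := by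
  rcases a with _ | a <;> rcases b with _ | b <;> rcases p with _ | p <;> rcases q with _ | q <;>
    rcases r with _ | r <;> rcases s with _ | s <;> rcases v with _ | v <;> rcases w with _ | w <;>
    simp [madd, mmul] <;> omega

-- Invariant for A's loop after k iterations.
theorem loopA_invariant (regular express : List Int) (c : Int) (k : Nat)
    (hk : k ≤ regular.length) :
    ∃ R E : List Int,
      (PySem.List.pyRange 1 ((k : Int) + 1) 1).foldl (stepA regular express c)
          (List.replicate (regular.length + 1) 0, List.replicate (regular.length + 1) c,
            List.replicate regular.length 0)
        = (R, E, ansList regular express c k ++ List.replicate (regular.length - k) 0)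
      ∧ R.length = regular.length + 1 ∧ E.length = regular.length + 1
      ∧ PySem.List.pyGetD R (k : Int) 0 = (specRE regular express c k).1
      ∧ PySem.List.pyGetD E (k : Int) 0 = (specRE regular express c k).2 := by
  induction k with
  | zero =>
    refine ⟨List.replicate (regular.length + 1) 0, List.replicate (regular.length + 1) c,
      ?_, by simp, by simp, ?_, ?_⟩
    · rw [PySem.List.pyRange_one_eq_nil (by omega)]
      simp [ansList, specRE]
    · simp [specRE, PySem.List.pyGetD_zero]
    · simp [specRE, PySem.List.pyGetD_zero]
  | succ k ih =>
    have hkn : k < regular.length := by omega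
    obtain ⟨R, E, hfold, hR, hE, hr, he⟩ := ih (by omega)
    have hsplit : PySem.List.pyRange 1 (((k + 1 : Nat) : Int) + 1) 1
        = PySem.List.pyRange 1 ((k : Int) + 1) 1 ++ [(k : Int) + 1] := by
      have : (((k + 1 : Nat) : Int) + 1) = ((k : Int) + 1) + 1 := by push_cast; ring
      rw [this, PySem.List.pyRange_one_succ_right (by omega)]
    have hcast : ((k : Int) + 1) = ((k + 1 : Nat) : Int) := by push_cast; ring
    refine ⟨R.set (k + 1)
        (min (specRE regular express c k).1 (specRE regular express c k).2
          + PySem.List.pyGetD regular ((k : Nat) : Int) 0),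
      E.set (k + 1)
        (min ((specRE regular express c k).1 + c) (specRE regular express c k).2
          + PySem.List.pyGetD express ((k : Nat) : Int) 0), ?_, by simp [hR],
      by simp [hE], ?_, ?_⟩
    · rw [hsplit, List.foldl_append, hfold]
      simp only [List.foldl_cons, List.foldl_nil]
      unfold stepA
      simp only [add_sub_cancel_right]
      rw [hcast]
      rw [PySem.List.pyGetD_pySetD_natCast R (k + 1) k _ _ (by omega), if_neg (by omega)]
      rw [PySem.List.pyGetD_pySetD_natCast R (k + 1) (k + 1) _ _ (by omega), if_pos rfl]
      rw [PySem.List.pyGetD_pySetD_natCast E (k + 1) (k + 1) _ _ (by omega), if_pos rfl]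
      rw [PySem.List.pySetD_natCast, PySem.List.pySetD_natCast]
      rw [hr, he]
      refine congrArg (Prod.mk _) (congrArg (Prod.mk _) ?_)
      rw [show ((k : Int)) = ((k : Nat) : Int) from rfl, PySem.List.pySetD_natCast]
      rw [List.set_append, if_neg (by simp [ansList])]
      have hlen : (ansList regular express c k).length = k := by simp [ansList]
      have hrep : regular.length - k = (regular.length - (k + 1)) + 1 := by omega
      rw [hlen, hrep, List.replicate_succ]
      simp [ansList, List.range_succ, List.append_assoc, specRE]
    · rw [← PySem.List.pySetD_natCast R (k + 1),
        PySem.List.pyGetD_pySetD_natCast R (k + 1) (k + 1) _ _ (by omega), if_pos rfl]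
      simp [specRE]
    · rw [← PySem.List.pySetD_natCast E (k + 1),
        PySem.List.pyGetD_pySetD_natCast E (k + 1) (k + 1) _ _ (by omega), if_pos rfl]
      simp [specRE]

-- apply a 2x2 min-plus matrix to the start vector (0, c)
def applyP (P : (Option Int × Option Int) × (Option Int × Option Int)) (c : Int) :
    Option Int × Option Int :=
  (madd (mmul P.1.1 (some 0)) (mmul P.1.2 (some c)),
   madd (mmul P.2.1 (some 0)) (mmul P.2.2 (some c)))

-- Invariant for B's fold after k pairs.
theorem loopB_invariant (regular express : List Int) (c : Int)
    (h : regular.length ≤ express.length) (k : Nat) (hk : k ≤ regular.length) :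
    ∃ P, ((regular.zip express).take k).foldl (stepB c) ([], ((some 0, none), (none, some 0)))
        = (ansList regular express c k, P)
      ∧ applyP P c = (some (specRE regular express c k).1, some (specRE regular express c k).2) := by
  induction k with
  | zero =>
    exact ⟨((some 0, none), (none, some 0)), by simp [ansList],
      by simp [applyP, madd, mmul, specRE]⟩
  | succ k ih =>
    have hkn : k < regular.length := by omega
    obtain ⟨P, hfold, happ⟩ := ih (by omega)
    have hzk : (regular.zip express)[k]? = some (regular[k], express[k]'(by omega)) := by
      rw [List.getElem?_eq_getElem (by simp [List.length_zip]; omega)]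
      simp [List.getElem_zip]
    have hstep : ((regular.zip express).take (k + 1)).foldl (stepB c)
          ([], ((some 0, none), (none, some 0)))
        = stepB c (ansList regular express c k, P) (regular[k], express[k]'(by omega)) := by
      rw [List.take_add_one, hzk]
      simp [hfold]
    have hgreg : PySem.List.pyGetD regular (k : Int) 0 = regular[k] := by
      rw [PySem.List.pyGetD_natCast, List.getD_eq_getElem?_getD, List.getElem?_eq_getElem hkn]
      rfl
    have hgexp : PySem.List.pyGetD express (k : Int) 0 = express[k]'(by omega) := by
      rw [PySem.List.pyGetD_natCast, List.getD_eq_getElem?_getD,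
        List.getElem?_eq_getElem (by omega : k < express.length)]
      rfl
    -- the new vector after one more matrix: use associativity per coordinate
    have hx := row_assoc (some regular[k]) (some regular[k]) P.1.1 P.1.2 P.2.1 P.2.2
      (some 0) (some c)
    have hy := row_assoc (some (express[k]'(by omega) + c)) (some (express[k]'(by omega)))
      P.1.1 P.1.2 P.2.1 P.2.2 (some 0) (some c)
    have happ' : madd (mmul P.1.1 (some 0)) (mmul P.1.2 (some c))
          = some (specRE regular express c k).1
        ∧ madd (mmul P.2.1 (some 0)) (mmul P.2.2 (some c))
          = some (specRE regular express c k).2 := by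
      have := happ
      simp only [applyP, Prod.mk.injEq] at this
      exact this
    refine ⟨(stepB c (ansList regular express c k, P)
        (regular[k], express[k]'(by omega))).2, ?_, ?_⟩
    · rw [hstep]
      refine Prod.ext ?_ rfl
      simp only [stepB]
      rw [hx, hy, happ'.1, happ'.2]
      simp only [ansList, List.range_succ, List.map_append, List.map_cons, List.map_nil]
      refine congrArg _ (congrArg (fun t => [t]) ?_)
      simp [madd, mmul, specRE, hgreg, hgexp]
      omega
    · simp only [stepB, applyP]
      rw [hx, hy, happ'.1, happ'.2]
      simp [madd, mmul, specRE, hgreg, hgexp]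
      omega

-- ===== VERDICT =====
theorem minimumCosts_spec : Claim_equal_minimumCosts := by
  intro regular express c _ hpre
  have hpre' : regular.length ≤ express.length := hpre
  unfold Spec_minimumCosts minimumCosts minimumCosts_alt
  simp only []
  obtain ⟨R, E, hfold, -, -, -, -⟩ := loopA_invariant regular express c regular.length le_rfl
  obtain ⟨P, hfoldB, -⟩ := loopB_invariant regular express c hpre' regular.length le_rfl
  have hz : (regular.zip express).length = regular.length := by
    simp [List.length_zip]; omega
  rw [hfold]
  rw [List.take_of_length_le (le_of_eq hz)] at hfoldB
  rw [hfoldB]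
  simp
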